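-- pv_equiv track=rewrite | github.com/kindomLee/openclaw-workspace-template | scripts/memory-compress.py | build_notification_message
-- ===== SOURCE A (Python) =====
-- def build_notification_message(actions: list[str], dry_run: bool) -> str:
--     mode = "🔍 Preview" if dry_run else "⚡ Execute"
--     lines = [f"📊 memory-compress {mode}", ""]
--
--     if not actions:
--         lines.append("✨ Nothing to process")
--     else:
--         timeline_compress = [a for a in actions if "Timeline" in a]
--         p2_compress = [a for a in actions if "P2" in a]
--         p1_pending = [a for a in actions if "P1" in a]
--         archive_logs = [a for a in actions if "Archive" in a]
--         lines.append(f"📋 {len(actions)} item(s):")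
--         if timeline_compress:
--             lines.append(f"  • 📦 Timeline folded: {len(timeline_compress)}")
--         if p2_compress:
--             lines.append(f"  • 🗜️ P2 compressed: {len(p2_compress)}")
--         if p1_pending:
--             lines.append(f"  • ⏳ P1 flagged: {len(p1_pending)}")
--         for a in archive_logs:
--             lines.append(f"  • 📁 {a}")
--
--     lines.append("")
--     lines.append("💡 Run --force to apply" if dry_run else "✅ Applied")
--     return "\n".join(lines)
-- ===== SOURCE B (Python) =====
-- def build_notification_message(actions: list[str], dry_run: bool) -> str:
--     # one pass over actions with three counters and one archive accumulator,
--     # instead of four separate list comprehensions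
--     timeline = p2 = p1 = 0
--     archive_logs = []
--     for a in actions:
--         if "Timeline" in a:
--             timeline += 1
--         if "P2" in a:
--             p2 += 1
--         if "P1" in a:
--             p1 += 1
--         if "Archive" in a:
--             archive_logs.append(a)
--     mode = "🔍 Preview" if dry_run else "⚡ Execute"
--     lines = ["📊 memory-compress " + mode, ""]
--     if not actions:
--         lines.append("✨ Nothing to process")
--     else:
--         lines.append("📋 " + str(len(actions)) + " item(s):")
--         if timeline:
--             lines.append("  • 📦 Timeline folded: " + str(timeline))
--         if p2:
--             lines.append("  • 🗜️ P2 compressed: " + str(p2))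
--         if p1:
--             lines.append("  • ⏳ P1 flagged: " + str(p1))
--         lines.extend("  • 📁 " + a for a in archive_logs)
--     lines.append("")
--     lines.append("💡 Run --force to apply" if dry_run else "✅ Applied")
--     return "\n".join(lines)
-- ===== Notes on version B (the rewrite author's own statement) =====
-- stated objective: simpler
-- what changed: Replaces A's four separate list comprehensions over actions with a single pass maintaining three counters and one archive accumulator.
import Mathlib
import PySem

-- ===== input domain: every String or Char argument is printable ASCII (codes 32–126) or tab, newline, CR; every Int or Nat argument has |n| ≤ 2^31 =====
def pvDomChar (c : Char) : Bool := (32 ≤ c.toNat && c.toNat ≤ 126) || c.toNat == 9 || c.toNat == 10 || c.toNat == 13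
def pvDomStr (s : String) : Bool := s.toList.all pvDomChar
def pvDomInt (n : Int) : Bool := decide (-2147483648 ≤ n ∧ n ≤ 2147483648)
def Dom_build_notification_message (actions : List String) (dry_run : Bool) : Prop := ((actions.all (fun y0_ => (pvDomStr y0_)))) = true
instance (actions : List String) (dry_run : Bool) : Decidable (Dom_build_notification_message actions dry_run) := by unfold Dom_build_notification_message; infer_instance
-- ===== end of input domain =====

-- B replaces A's four list comprehensions with one pass carrying three counters and an archive list (objective: simpler).

-- ===== PORT A =====
def build_notification_message (actions : List String) (dry_run : Bool) : String :=
  let mode := if dry_run then "🔍 Preview" else "⚡ Execute"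
  let lines : List String := ["📊 memory-compress " ++ mode, ""]
  let lines :=
    if actions = [] then
      lines ++ ["✨ Nothing to process"]
    else
      let timeline_compress := actions.filter (fun a => PySem.Str.isIn "Timeline" a)
      let p2_compress := actions.filter (fun a => PySem.Str.isIn "P2" a)
      let p1_pending := actions.filter (fun a => PySem.Str.isIn "P1" a)
      let archive_logs := actions.filter (fun a => PySem.Str.isIn "Archive" a)
      let lines := lines ++ ["📋 " ++ PySem.Int.toStr (actions.length : Int) ++ " item(s):"]
      let lines := if timeline_compress ≠ [] then lines ++ ["  • 📦 Timeline folded: " ++ PySem.Int.toStr (timeline_compress.length : Int)] else lines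
      let lines := if p2_compress ≠ [] then lines ++ ["  • 🗜️ P2 compressed: " ++ PySem.Int.toStr (p2_compress.length : Int)] else lines
      let lines := if p1_pending ≠ [] then lines ++ ["  • ⏳ P1 flagged: " ++ PySem.Int.toStr (p1_pending.length : Int)] else lines
      lines ++ archive_logs.map (fun a => "  • 📁 " ++ a)
  let lines := lines ++ [""]
  let lines := lines ++ [if dry_run then "💡 Run --force to apply" else "✅ Applied"]
  PySem.Str.join "\n" lines

-- ===== PORT B =====
def bnmStep (st : Int × Int × Int × List String) (a : String) : Int × Int × Int × List String :=
  let st := if PySem.Str.isIn "Timeline" a then (st.1 + 1, st.2.1, st.2.2.1, st.2.2.2) else st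
  let st := if PySem.Str.isIn "P2" a then (st.1, st.2.1 + 1, st.2.2.1, st.2.2.2) else st
  let st := if PySem.Str.isIn "P1" a then (st.1, st.2.1, st.2.2.1 + 1, st.2.2.2) else st
  if PySem.Str.isIn "Archive" a then (st.1, st.2.1, st.2.2.1, st.2.2.2 ++ [a]) else st

def build_notification_message_alt (actions : List String) (dry_run : Bool) : String :=
  let st := actions.foldl bnmStep (0, 0, 0, [])
  let timeline := st.1
  let p2 := st.2.1
  let p1 := st.2.2.1
  let archive_logs := st.2.2.2
  let mode := if dry_run then "🔍 Preview" else "⚡ Execute"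
  let lines : List String := ["📊 memory-compress " ++ mode, ""]
  let lines :=
    if actions = [] then
      lines ++ ["✨ Nothing to process"]
    else
      let lines := lines ++ ["📋 " ++ PySem.Int.toStr (actions.length : Int) ++ " item(s):"]
      let lines := if timeline ≠ 0 then lines ++ ["  • 📦 Timeline folded: " ++ PySem.Int.toStr timeline] else lines
      let lines := if p2 ≠ 0 then lines ++ ["  • 🗜️ P2 compressed: " ++ PySem.Int.toStr p2] else lines
      let lines := if p1 ≠ 0 then lines ++ ["  • ⏳ P1 flagged: " ++ PySem.Int.toStr p1] else lines
      lines ++ archive_logs.map (fun a => "  • 📁 " ++ a)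
  let lines := lines ++ [""]
  let lines := lines ++ [if dry_run then "💡 Run --force to apply" else "✅ Applied"]
  PySem.Str.join "\n" lines

-- ===== PRECONDITION & SPEC =====
def Spec_build_notification_message (actions : List String) (dry_run : Bool) (out : String) : Prop := out = build_notification_message_alt actions dry_run
instance (actions : List String) (dry_run : Bool) (out : String) : Decidable (Spec_build_notification_message actions dry_run out) := by unfold Spec_build_notification_message; infer_instance

-- ===== CLAIM (what is proved, stated in full; the proofs are below) =====
def Claim_equal_build_notification_message : Prop := ∀ (actions : List String) (dry_run : Bool), Dom_build_notification_message actions dry_run → Spec_build_notification_message actions dry_run (build_notification_message actions dry_run)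

-- ===== LEMMAS AND PROOFS =====

-- the single-pass fold computes the three membership counts and the archive filter
theorem bnm_fold_inv (l : List String) (t p2 p1 : Int) (arch : List String) :
    l.foldl bnmStep (t, p2, p1, arch) =
      (t + (l.countP (fun a => PySem.Str.isIn "Timeline" a) : Int),
       p2 + (l.countP (fun a => PySem.Str.isIn "P2" a) : Int),
       p1 + (l.countP (fun a => PySem.Str.isIn "P1" a) : Int),
       arch ++ l.filter (fun a => PySem.Str.isIn "Archive" a)) := by
  induction l generalizing t p2 p1 arch with
  | nil => simp
  | cons a l ih =>
    simp only [List.foldl_cons, List.countP_cons, List.filter_cons, bnmStep]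
    split_ifs <;> rw [ih] <;> simp only [Prod.mk.injEq] <;>
      refine ⟨?_, ?_, ?_, ?_⟩ <;> first | omega | simp

-- ===== VERDICT (by name: the statement is the Claim_ definition above) =====
theorem build_notification_message_spec : Claim_equal_build_notification_message := by
  intro actions dry_run _
  unfold Spec_build_notification_message build_notification_message build_notification_message_alt
  rw [bnm_fold_inv]
  simp only [zero_add, List.nil_append]
  by_cases h : actions = []
  · simp [h]
  · simp only [h, if_false,
      List.countP_eq_length_filter, ne_eq, Int.natCast_eq_zero, List.length_eq_zero_iff]
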